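-- pv_equiv track=rewrite | github.com/DeadlyKurbo/project-spectre | owner_portal.py | _normalise_manager_ids
-- ===== SOURCE A (Python) =====
-- from typing import Iterable, Tuple
--
-- def _normalise_manager_ids(values: Iterable[str]) -> list[str]:
--     """Return a sorted, de-duplicated list of Discord IDs as strings."""
--
--     seen: set[str] = set()
--     normalised: list[str] = []
--     for raw in values:
--         if raw is None:
--             continue
--         value = str(raw).strip()
--         if not value or not value.isdigit():
--             continue
--         if value in seen:
--             continue
--         seen.add(value)
--         normalised.append(value)
--     normalised.sort()
--     return normalised
-- ===== SOURCE B (Python) =====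
-- from itertools import groupby
--
--
-- def _normalise_manager_ids(values):
--     """Return a sorted, de-duplicated list of Discord IDs as strings."""
--
--     valid = []
--     for raw in values:
--         if raw is None:
--             continue
--         value = str(raw).strip()
--         if value and value.isdigit():
--             valid.append(value)
--     valid.sort()
--     return [key for key, _group in groupby(valid)]
-- ===== Notes on version B (the rewrite author's own statement) =====
-- stated objective: alternative
-- what changed: B drops the seen-set bookkeeping: it collects all valid normalised strings, sorts them, and removes duplicates by a single adjacency pass (itertools.groupby) over the sorted list instead of deduplicating before sorting with a set.
import Mathlib
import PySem

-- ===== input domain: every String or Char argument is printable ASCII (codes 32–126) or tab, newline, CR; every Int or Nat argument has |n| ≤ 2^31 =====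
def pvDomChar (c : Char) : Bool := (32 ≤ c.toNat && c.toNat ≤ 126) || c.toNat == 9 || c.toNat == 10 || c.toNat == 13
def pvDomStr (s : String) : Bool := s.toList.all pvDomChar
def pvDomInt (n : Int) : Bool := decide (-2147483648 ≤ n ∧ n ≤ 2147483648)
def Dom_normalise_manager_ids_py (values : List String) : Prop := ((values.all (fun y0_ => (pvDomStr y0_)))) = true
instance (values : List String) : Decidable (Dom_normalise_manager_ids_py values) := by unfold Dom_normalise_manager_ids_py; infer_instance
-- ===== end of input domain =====

-- B replaces A's seen-set dedup-then-sort with filter, sort, then one adjacent-dedup pass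
-- (itertools.groupby); alternative decomposition, same result.

-- ===== PORT A =====
-- A: one pass with a 'seen' set collecting first occurrences of valid values, then sort.
-- (values are strings, so the 'raw is None' branch never fires and is not ported)
def normalise_manager_ids_py (values : List String) : List String :=
  let st := values.foldl (fun (st : PySem.Set String × List String) raw =>
    let value := PySem.Str.strip raw
    if value = "" ∨ PySem.Str.strIsdigit value = false then st
    else if PySem.Set.contains st.1 value then st
    else (PySem.Set.add st.1 value, st.2 ++ [value])) (PySem.Set.empty, [])
  PySem.List.sorted st.2 (fun x => x) false

-- ===== PORT B =====
-- [key for key, _group in groupby(valid)]: each maximal run of equal elements contributes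
-- its key once; on a list this is: keep the head, skip the run of equal elements, recurse.
def pvGroupKeys : List String → List String
  | [] => []
  | x :: xs => x :: pvGroupKeys (xs.dropWhile (fun y => y == x))
termination_by l => l.length
decreasing_by
  simpa using Nat.lt_succ_of_le (List.Sublist.length_le (List.dropWhile_sublist _))

def normalise_manager_ids_py_alt (values : List String) : List String :=
  let valid := values.foldl (fun acc raw =>
    let value := PySem.Str.strip raw
    if value ≠ "" ∧ PySem.Str.strIsdigit value = true then acc ++ [value] else acc) []
  pvGroupKeys (PySem.List.sorted valid (fun x => x) false)

-- ===== PRECONDITION & SPEC =====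
def Spec_normalise_manager_ids_py (values : List String) (out : List String) : Prop := out = normalise_manager_ids_py_alt values
instance (values : List String) (out : List String) : Decidable (Spec_normalise_manager_ids_py values out) := by unfold Spec_normalise_manager_ids_py; infer_instance

-- ===== CLAIM (what is proved, stated in full; the proofs are below) =====
def Claim_equal_normalise_manager_ids_py : Prop := ∀ (values : List String), Dom_normalise_manager_ids_py values → Spec_normalise_manager_ids_py values (normalise_manager_ids_py values)

-- ===== LEMMAS AND PROOFS =====

-- membership in pvGroupKeys is membership in the list (general, no sortedness needed)
theorem mem_pvGroupKeys (l : List String) (a : String) : a ∈ pvGroupKeys l ↔ a ∈ l := by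
  induction l using pvGroupKeys.induct with
  | case1 => simp [pvGroupKeys]
  | case2 x xs ih =>
    rw [pvGroupKeys]
    simp only [List.mem_cons, ih]
    constructor
    · rintro (rfl | h)
      · exact Or.inl rfl
      · exact Or.inr ((List.dropWhile_sublist _).mem h)
    · rintro (rfl | h)
      · exact Or.inl rfl
      · by_cases hd : a ∈ xs.dropWhile (fun y => y == x)
        · exact Or.inr hd
        · have ht : a ∈ xs.takeWhile (fun y => y == x) := by
            have hsplit := List.takeWhile_append_dropWhile (p := fun y => y == x) (l := xs)
            rw [← hsplit] at h
            rcases List.mem_append.mp h with h1 | h1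
            · exact h1
            · exact absurd h1 hd
          have hax : (a == x) = true := List.mem_takeWhile_imp (p := fun y => y == x) ht
          exact Or.inl (by simpa using hax)

-- on a (≤)-sorted list, pvGroupKeys is strictly increasing
theorem pairwise_lt_pvGroupKeys (l : List String) (h : l.Pairwise (· ≤ ·)) :
    (pvGroupKeys l).Pairwise (· < ·) := by
  induction l using pvGroupKeys.induct with
  | case1 => simp [pvGroupKeys]
  | case2 x xs ih =>
    rw [pvGroupKeys]
    have hxs : xs.Pairwise (· ≤ ·) := (List.pairwise_cons.mp h).2
    have hle : ∀ y ∈ xs, x ≤ y := (List.pairwise_cons.mp h).1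
    have hd : (xs.dropWhile (fun y => y == x)).Pairwise (· ≤ ·) :=
      hxs.sublist (List.dropWhile_sublist _)
    refine List.pairwise_cons.mpr ⟨?_, ih hd⟩
    intro y hy
    have hymem : y ∈ xs.dropWhile (fun y => y == x) := (mem_pvGroupKeys _ _).mp hy
    -- all elements of the dropWhile tail are ≥ its head, and its head ≠ x
    cases hcons : xs.dropWhile (fun y => y == x) with
    | nil => simp [hcons] at hymem
    | cons z t =>
      have hz : (fun y => y == x) z = false := by
        have := List.head_dropWhile_not (fun y => y == x) (l := xs) (by rw [hcons]; simp)
        simpa [hcons] using this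
      have hzx : z ≠ x := by simpa using hz
      have hxz : x < z := by
        have : x ≤ z := hle z ((List.dropWhile_sublist _).mem (by rw [hcons]; simp))
        exact lt_of_le_of_ne this (Ne.symm hzx)
      rw [hcons] at hymem
      rcases List.mem_cons.mp hymem with rfl | hyt
      · exact hxz
      · have : z ≤ y := by
          rw [hcons] at hd
          exact (List.pairwise_cons.mp hd).1 y hyt
        exact lt_of_lt_of_le hxz this

-- B's collecting fold is append of the filtered stripped values
theorem foldB_eq (values : List String) (acc : List String) :
    values.foldl (fun acc raw =>
      let value := PySem.Str.strip raw
      if value ≠ "" ∧ PySem.Str.strIsdigit value = true then acc ++ [value] else acc) acc =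
    acc ++ (values.map PySem.Str.strip).filter
      (fun v => decide (v ≠ "" ∧ PySem.Str.strIsdigit v = true)) := by
  induction values generalizing acc with
  | nil => simp
  | cons raw rest ih =>
    simp only [List.foldl_cons, List.map_cons, List.filter_cons]
    by_cases h : PySem.Str.strip raw ≠ "" ∧ PySem.Str.strIsdigit (PySem.Str.strip raw) = true
    · have hd : decide (PySem.Str.strip raw ≠ "" ∧ PySem.Str.strIsdigit (PySem.Str.strip raw) = true) = true :=
        decide_eq_true h
      rw [if_pos h, ih, hd, if_pos rfl]
      simp only [List.append_assoc, List.singleton_append]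
    · have hd : decide (PySem.Str.strip raw ≠ "" ∧ PySem.Str.strIsdigit (PySem.Str.strip raw) = true) = false :=
        decide_eq_false h
      rw [if_neg h, ih, hd, if_neg Bool.false_ne_true]

-- A's fold, started with seen = normalised, keeps seen = normalised and computes
-- Set.update of the start state by the filtered stripped values
theorem foldA_eq (values : List String) (n : List String) :
    values.foldl (fun (st : PySem.Set String × List String) raw =>
      let value := PySem.Str.strip raw
      if value = "" ∨ PySem.Str.strIsdigit value = false then st
      else if PySem.Set.contains st.1 value then st
      else (PySem.Set.add st.1 value, st.2 ++ [value])) (n, n) =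
    (PySem.Set.update n ((values.map PySem.Str.strip).filter
        (fun v => decide (v ≠ "" ∧ PySem.Str.strIsdigit v = true))),
     PySem.Set.update n ((values.map PySem.Str.strip).filter
        (fun v => decide (v ≠ "" ∧ PySem.Str.strIsdigit v = true)))) := by
  induction values generalizing n with
  | nil => rfl
  | cons raw rest ih =>
    simp only [List.foldl_cons, List.map_cons, List.filter_cons]
    by_cases h1 : PySem.Str.strip raw = "" ∨ PySem.Str.strIsdigit (PySem.Str.strip raw) = false
    · have h2 : ¬ (PySem.Str.strip raw ≠ "" ∧ PySem.Str.strIsdigit (PySem.Str.strip raw) = true) := by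
        rintro ⟨hne, hdig⟩
        rcases h1 with h | h
        · exact hne h
        · rw [h] at hdig; exact Bool.false_ne_true hdig
      have hd : decide (PySem.Str.strip raw ≠ "" ∧ PySem.Str.strIsdigit (PySem.Str.strip raw) = true) = false :=
        decide_eq_false h2
      rw [if_pos h1, hd, if_neg Bool.false_ne_true]
      exact ih n
    · have h2 : PySem.Str.strip raw ≠ "" ∧ PySem.Str.strIsdigit (PySem.Str.strip raw) = true := by
        rw [not_or] at h1
        refine ⟨h1.1, ?_⟩
        cases hb : PySem.Str.strIsdigit (PySem.Str.strip raw)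
        · exact absurd hb h1.2
        · rfl
      have hd : decide (PySem.Str.strip raw ≠ "" ∧ PySem.Str.strIsdigit (PySem.Str.strip raw) = true) = true :=
        decide_eq_true h2
      rw [if_neg h1, hd, if_pos rfl]
      by_cases hc : PySem.Set.contains n (PySem.Str.strip raw) = true
      · have hadd : PySem.Set.add n (PySem.Str.strip raw) = n := by
          unfold PySem.Set.add; rw [hc]; simp
        rw [if_pos hc, ih n]
        have hupd : ∀ L : List String, PySem.Set.update n
            (PySem.Str.strip raw :: L) = PySem.Set.update n L := by
          intro L
          show (PySem.Str.strip raw :: L).foldl PySem.Set.add n = L.foldl PySem.Set.add n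
          rw [List.foldl_cons, hadd]
        rw [hupd]
      · have hst : (PySem.Set.add n (PySem.Str.strip raw), n ++ [PySem.Str.strip raw])
            = (PySem.Set.add n (PySem.Str.strip raw), PySem.Set.add n (PySem.Str.strip raw)) := by
          have : PySem.Set.add n (PySem.Str.strip raw) = n ++ [PySem.Str.strip raw] := by
            unfold PySem.Set.add
            rw [if_neg]
            simpa using hc
          rw [this]
        rw [if_neg hc, hst, ih (PySem.Set.add n (PySem.Str.strip raw))]
        have hupd : ∀ L : List String, PySem.Set.update n (PySem.Str.strip raw :: L)
            = PySem.Set.update (PySem.Set.add n (PySem.Str.strip raw)) L := by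
          intro L
          show (PySem.Str.strip raw :: L).foldl PySem.Set.add n = _
          rw [List.foldl_cons]
          rfl
        rw [hupd]

-- ===== VERDICT (by name: the statement is the Claim_ definition above) =====
theorem normalise_manager_ids_py_spec : Claim_equal_normalise_manager_ids_py := by
  intro values _
  show _ = _
  unfold normalise_manager_ids_py normalise_manager_ids_py_alt
  simp only []
  rw [show (PySem.Set.empty : PySem.Set String) = ([] : List String) from rfl]
  rw [foldA_eq values [], foldB_eq values []]
  simp only [List.nil_append]
  set V := (values.map PySem.Str.strip).filter
      (fun v => decide (v ≠ "" ∧ PySem.Str.strIsdigit v = true)) with hV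
  -- A = sorted(set(V)); B = pvGroupKeys(sorted V); both are the unique strictly
  -- increasing rearrangement of set(V)
  have hofl : PySem.Set.update ([] : List String) V = PySem.Set.ofList V := rfl
  rw [hofl]
  have hpw : (pvGroupKeys (PySem.List.sorted V (fun x => x) false)).Pairwise (· < ·) :=
    pairwise_lt_pvGroupKeys _ (PySem.List.sorted_pairwise V (fun x => x))
  apply PySem.List.sorted_eq_of_perm_of_pairwise_lt
  · refine (List.perm_ext_iff_of_nodup (hpw.imp ne_of_lt) (PySem.Set.nodup_ofList V)).mpr ?_
    intro a
    rw [mem_pvGroupKeys, PySem.List.mem_sorted, PySem.Set.mem_ofList]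
  · exact hpw
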